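-- pv_equiv track=rewrite | github.com/cheng1608/Knowledge-Gragh-of-Turing | scripts/graph/enrich_relations_text_cooccurrence.py | build_comention_edges
-- ===== SOURCE A (Python) =====
-- from itertools import combinations
-- from typing import Dict, Iterable, List, Set, Tuple
--
-- def build_comention_edges(
--     sentence_qids: List[Set[str]],
--     sentences: List[str],
--     min_co_mentions: int,
--     max_evidence_len: int = 320,
-- ) -> List[Tuple[str, str, str, str, str]]:
--     pair_count: Dict[Tuple[str, str], int] = {}
--     pair_evidence: Dict[Tuple[str, str], str] = {}
--     for idx, qids in enumerate(sentence_qids):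
--         if len(qids) < 2:
--             continue
--         sent = sentences[idx] if idx < len(sentences) else ""
--         excerpt = (sent or "")[:max_evidence_len]
--         for a, b in combinations(sorted(qids), 2):
--             pair_count[(a, b)] = pair_count.get((a, b), 0) + 1
--             if (a, b) not in pair_evidence and excerpt:
--                 pair_evidence[(a, b)] = excerpt
--
--     edges: List[Tuple[str, str, str, str, str]] = []
--     for (a, b), c in pair_count.items():
--         if c < min_co_mentions:
--             continue
--         role = f"co_mentions={c}"
--         edges.append((a, "CO_MENTIONED", b, role, pair_evidence.get((a, b), "")))
--     return edges
-- ===== SOURCE B (Python) =====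
-- from itertools import combinations
-- from typing import List, Set, Tuple
--
-- def build_comention_edges(
--     sentence_qids: List[Set[str]],
--     sentences: List[str],
--     min_co_mentions: int,
--     max_evidence_len: int = 320,
-- ) -> List[Tuple[str, str, str, str, str]]:
--     # Materialize a flat event stream: one (pair, excerpt) record per co-mention.
--     events: List[Tuple[Tuple[str, str], str]] = []
--     for idx, qids in enumerate(sentence_qids):
--         if len(qids) < 2:
--             continue
--         excerpt = (sentences[idx] if idx < len(sentences) else "")[:max_evidence_len]
--         for pair in combinations(sorted(qids), 2):
--             events.append((pair, excerpt))
--     # Group by scanning: at each pair's first appearance, derive its count and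
--     # evidence directly from the event stream (no aggregate dicts at all).
--     edges: List[Tuple[str, str, str, str, str]] = []
--     seen: Set[Tuple[str, str]] = set()
--     for pair, _ in events:
--         if pair in seen:
--             continue
--         seen.add(pair)
--         c = sum(1 for p, _ in events if p == pair)
--         if c >= min_co_mentions:
--             evidence = next((e for p, e in events if p == pair and e), "")
--             a, b = pair
--             edges.append((a, "CO_MENTIONED", b, f"co_mentions={c}", evidence))
--     return edges
-- ===== Notes on version B (the rewrite author's own statement) =====
-- stated objective: alternative
-- what changed: Instead of incrementally maintaining aggregate dicts (pair -> count, pair -> first evidence) while scanning sentences, B first materializes a flat event stream of (pair, excerpt) records and then emits edges by a group-by-scanning pass: at each pair's first appearance in the stream it counts that pair's events and picks its first non-empty excerpt directly from the stream, with no aggregate dictionaries at all.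
import Mathlib
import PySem

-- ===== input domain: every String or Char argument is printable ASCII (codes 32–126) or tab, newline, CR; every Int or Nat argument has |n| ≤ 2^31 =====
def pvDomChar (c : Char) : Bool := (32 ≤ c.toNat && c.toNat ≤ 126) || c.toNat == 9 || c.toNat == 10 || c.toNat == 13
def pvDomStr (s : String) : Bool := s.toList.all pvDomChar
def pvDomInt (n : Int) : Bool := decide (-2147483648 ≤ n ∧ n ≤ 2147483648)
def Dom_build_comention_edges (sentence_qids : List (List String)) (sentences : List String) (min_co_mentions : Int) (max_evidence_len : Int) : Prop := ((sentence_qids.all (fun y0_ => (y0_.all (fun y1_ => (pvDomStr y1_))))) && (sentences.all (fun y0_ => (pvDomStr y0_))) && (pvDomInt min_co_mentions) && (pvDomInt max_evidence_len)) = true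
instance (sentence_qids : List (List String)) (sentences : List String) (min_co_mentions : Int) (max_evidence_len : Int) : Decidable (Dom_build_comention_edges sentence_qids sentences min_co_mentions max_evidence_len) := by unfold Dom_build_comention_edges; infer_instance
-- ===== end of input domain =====

-- B replaces A's incrementally maintained aggregate dicts (pair -> count, pair -> first evidence)
-- by a flat materialized event stream (one (pair, excerpt) record per co-mention) followed by a
-- group-by-scanning pass that, at each pair's first appearance, derives its count and evidence
-- directly from the stream (objective: alternative decomposition).

-- ===== PORT A =====
-- inner loop body of A: update pair_count and pair_evidence for one pair (a, b)
def pvStepA (st : PySem.Dict (String × String) Int × PySem.Dict (String × String) String)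
    (excerpt : String) (c : List String) :
    PySem.Dict (String × String) Int × PySem.Dict (String × String) String :=
  match c with
  | [a, b] =>
      let cnt := st.1.insert (a, b) (st.1.getD (a, b) 0 + 1)
      let ev := if st.2.contains (a, b) = false ∧ excerpt ≠ "" then st.2.insert (a, b) excerpt else st.2
      (cnt, ev)
  | _ => st

def build_comention_edges (sentence_qids : List (List String)) (sentences : List String) (min_co_mentions : Int) (max_evidence_len : Int) : List (String × String × String × String × String) :=
  let st := (PySem.List.enumerate sentence_qids 0).foldl
    (fun st p =>
      let qids := PySem.Set.ofList p.2
      if qids.length < 2 then st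
      else
        let sent := if p.1 < (sentences.length : Int) then PySem.List.pyGetD sentences p.1 "" else ""
        let excerpt := PySem.Str.slice sent none (some max_evidence_len)
        (PySem.List.combinations (PySem.List.sorted qids (fun x => x) false) 2).foldl
          (fun st c => pvStepA st excerpt c) st)
    (PySem.Dict.empty, PySem.Dict.empty)
  st.1.items.foldl
    (fun edges kc =>
      if kc.2 < min_co_mentions then edges
      else edges ++ [(kc.1.1, "CO_MENTIONED", kc.1.2, "co_mentions=" ++ PySem.Int.toStr kc.2, st.2.getD kc.1 "")])
    []

-- ===== PORT B =====
-- inner loop body of B's first pass: append one (pair, excerpt) event record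
def pvEvStep (E : List ((String × String) × String)) (excerpt : String) (c : List String) :
    List ((String × String) × String) :=
  match c with
  | [a, b] => E ++ [((a, b), excerpt)]
  | _ => E

-- loop body of B's second pass: on a pair's first appearance, derive count and evidence from `events`
def pvStepB (events : List ((String × String) × String)) (mc : Int)
    (st : PySem.Set (String × String) × List (String × String × String × String × String))
    (pe : (String × String) × String) :
    PySem.Set (String × String) × List (String × String × String × String × String) :=
  if PySem.Set.contains st.1 pe.1 then st
  else
    let seen := PySem.Set.add st.1 pe.1
    let c : Int := (events.countP (fun q => q.1 == pe.1) : Int)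
    if mc ≤ c then
      (seen, st.2 ++ [(pe.1.1, "CO_MENTIONED", pe.1.2, "co_mentions=" ++ PySem.Int.toStr c,
        (((events.find? (fun q => q.1 == pe.1 && !(q.2 == ""))).map Prod.snd).getD ""))])
    else (seen, st.2)

def build_comention_edges_alt (sentence_qids : List (List String)) (sentences : List String) (min_co_mentions : Int) (max_evidence_len : Int) : List (String × String × String × String × String) :=
  let events := (PySem.List.enumerate sentence_qids 0).foldl
    (fun E p =>
      let qids := PySem.Set.ofList p.2
      if qids.length < 2 then E
      else
        let excerpt := PySem.Str.slice
          (if p.1 < (sentences.length : Int) then PySem.List.pyGetD sentences p.1 "" else "")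
          none (some max_evidence_len)
        (PySem.List.combinations (PySem.List.sorted qids (fun x => x) false) 2).foldl
          (fun E c => pvEvStep E excerpt c) E)
    []
  (events.foldl (pvStepB events min_co_mentions) (PySem.Set.empty, [])).2

-- ===== PRECONDITION & SPEC =====
def Spec_build_comention_edges (sentence_qids : List (List String)) (sentences : List String) (min_co_mentions : Int) (max_evidence_len : Int) (out : List (String × String × String × String × String)) : Prop := out = build_comention_edges_alt sentence_qids sentences min_co_mentions max_evidence_len
instance (sentence_qids : List (List String)) (sentences : List String) (min_co_mentions : Int) (max_evidence_len : Int) (out : List (String × String × String × String × String)) : Decidable (Spec_build_comention_edges sentence_qids sentences min_co_mentions max_evidence_len out) := by unfold Spec_build_comention_edges; infer_instance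

-- ===== CLAIM (what is proved, stated in full; the proofs are below) =====
def Claim_equal_build_comention_edges : Prop := ∀ (sentence_qids : List (List String)) (sentences : List String) (min_co_mentions : Int) (max_evidence_len : Int), Dom_build_comention_edges sentence_qids sentences min_co_mentions max_evidence_len → Spec_build_comention_edges sentence_qids sentences min_co_mentions max_evidence_len (build_comention_edges sentence_qids sentences min_co_mentions max_evidence_len)

-- ===== LEMMAS AND PROOFS =====

-- count of a pair's events, evidence drawn from the stream, and the edge (possibly none) a pair emits
def pvCount (E : List ((String × String) × String)) (k : String × String) : Int :=
  (E.countP (fun q => q.1 == k) : Int)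

def pvEvid (E : List ((String × String) × String)) (k : String × String) : String :=
  ((E.find? (fun q => q.1 == k && !(q.2 == ""))).map Prod.snd).getD ""

def pvEmit (mc : Int) (E : List ((String × String) × String)) (k : String × String) :
    List (String × String × String × String × String) :=
  if mc ≤ pvCount E k then
    [(k.1, "CO_MENTIONED", k.2, "co_mentions=" ++ PySem.Int.toStr (pvCount E k), pvEvid E k)]
  else []

-- first occurrences of keys not already in S, in order
def pvFirsts (S : PySem.Set (String × String)) : List (String × String) → List (String × String)
  | [] => []
  | k :: ks => if PySem.Set.contains S k then pvFirsts S ks else k :: pvFirsts (PySem.Set.add S k) ks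

theorem pvFirsts_mem {k : String × String} :
    ∀ (l : List (String × String)) (S : PySem.Set (String × String)), k ∈ pvFirsts S l → k ∈ l := by
  intro l
  induction l with
  | nil => intro S h; simp [pvFirsts] at h
  | cons x l ih =>
    intro S h
    by_cases hx : PySem.Set.contains S x = true
    · simp only [pvFirsts, if_pos hx] at h
      exact List.mem_cons_of_mem _ (ih S h)
    · simp only [pvFirsts, if_neg hx, List.mem_cons] at h
      rcases h with h | h
      · exact h ▸ List.mem_cons_self
      · exact List.mem_cons_of_mem _ (ih _ h)

theorem pvSet_contains_add (S : PySem.Set (String × String)) (x k : String × String) :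
    PySem.Set.contains (PySem.Set.add S x) k = (PySem.Set.contains S k || k == x) := by
  by_cases hx : PySem.Set.contains S x = true
  · simp only [PySem.Set.add, PySem.Set.contains] at *
    rw [if_pos hx]
    by_cases hkx : k = x
    · subst hkx
      have hm : k ∈ S := List.mem_of_elem_eq_true hx
      simp [hm]
    · simp [hkx]
  · simp only [PySem.Set.add, PySem.Set.contains] at *
    rw [if_neg hx]
    by_cases hkx : k = x
    · subst hkx; simp
    · simp [hkx]

theorem pvFirsts_complete {k : String × String} :
    ∀ (l : List (String × String)) (S : PySem.Set (String × String)),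
      k ∈ l → PySem.Set.contains S k = false → k ∈ pvFirsts S l := by
  intro l
  induction l with
  | nil => intro S h _; simp at h
  | cons x l ih =>
    intro S h hS
    by_cases hkx : k = x
    · subst hkx
      simp only [pvFirsts, hS, Bool.false_eq_true, if_false]
      exact List.mem_cons_self
    · have hl : k ∈ l := by
        rcases List.mem_cons.1 h with h' | h'
        · exact absurd h' hkx
        · exact h'
      by_cases hx : PySem.Set.contains S x = true
      · simp only [pvFirsts, if_pos hx]
        exact ih S hl hS
      · simp only [pvFirsts, if_neg hx]
        refine List.mem_cons_of_mem _ (ih _ hl ?_)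
        rw [pvSet_contains_add, hS]
        simp [hkx]

theorem pvFirsts_snoc (k : String × String) :
    ∀ (l : List (String × String)) (S : PySem.Set (String × String)),
      pvFirsts S (l ++ [k]) =
        pvFirsts S l ++ (if PySem.Set.contains S k || l.contains k then [] else [k]) := by
  intro l
  induction l with
  | nil => intro S; simp [pvFirsts]
  | cons x l ih =>
    intro S
    by_cases hx : PySem.Set.contains S x = true
    · simp only [List.cons_append, pvFirsts, if_pos hx, ih]
      congr 1
      by_cases hkx : k = x
      · subst hkx
        have hm : k ∈ S := List.mem_of_elem_eq_true hx
        simp [hm]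
      · simp [hkx]
    · simp only [List.cons_append, pvFirsts, if_neg hx, ih, List.cons_append]
      congr 1
      rw [pvSet_contains_add]
      by_cases hkx : k = x
      · subst hkx; simp
      · simp [hkx, Bool.or_comm]

theorem pvCount_snoc (E : List ((String × String) × String)) (k k' : String × String) (e : String) :
    pvCount (E ++ [(k, e)]) k' = pvCount E k' + if k' = k then 1 else 0 := by
  simp only [pvCount, List.countP_append, List.countP_cons, List.countP_nil]
  by_cases h : k' = k
  · subst h; simp
  · have hb : (((k, e) : (String × String) × String).1 == k') = false := by
      simp [Ne.symm h]
    simp [hb, h]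

-- Invariant tying A's (count, evidence) dicts to B's event stream.
def pvInv (cnt : PySem.Dict (String × String) Int) (ev : PySem.Dict (String × String) String)
    (E : List ((String × String) × String)) : Prop :=
  cnt.keys.Nodup ∧
  cnt.items = (pvFirsts PySem.Set.empty (E.map Prod.fst)).map (fun k => (k, pvCount E k)) ∧
  ∀ k, ev.get? k = (E.find? (fun q => q.1 == k && !(q.2 == ""))).map Prod.snd

theorem pvInv_keys {cnt : PySem.Dict (String × String) Int} {ev : PySem.Dict (String × String) String}
    {E : List ((String × String) × String)} (h : pvInv cnt ev E) :
    cnt.keys = pvFirsts PySem.Set.empty (E.map Prod.fst) := by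
  simp only [PySem.Dict.keys, h.2.1, List.map_map]
  exact List.map_id _

theorem pvInv_getD {cnt : PySem.Dict (String × String) Int} {ev : PySem.Dict (String × String) String}
    {E : List ((String × String) × String)} (h : pvInv cnt ev E) (k : String × String)
    (hk : k ∈ pvFirsts PySem.Set.empty (E.map Prod.fst)) :
    cnt.getD k 0 = pvCount E k := by
  have hmem : (k, pvCount E k) ∈ cnt.items := by
    rw [h.2.1]; exact List.mem_map.2 ⟨k, hk, rfl⟩
  exact PySem.Dict.getD_of_mem_items cnt hmem h.1 0

theorem pvInv_step {cnt : PySem.Dict (String × String) Int} {ev : PySem.Dict (String × String) String}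
    {E : List ((String × String) × String)} (h : pvInv cnt ev E) (e : String) (c : List String) :
    pvInv (pvStepA (cnt, ev) e c).1 (pvStepA (cnt, ev) e c).2 (pvEvStep E e c) := by
  match c with
  | [] => exact h
  | [_] => exact h
  | _ :: _ :: _ :: _ => exact h
  | [a, b] =>
    simp only [pvStepA, pvEvStep]
    set k : String × String := (a, b) with hk
    refine ⟨PySem.Dict.nodup_keys_insert cnt k _ h.1, ?_, ?_⟩
    · -- items relation
      rw [List.map_append, List.map_cons, List.map_nil, pvFirsts_snoc]
      by_cases hc : cnt.contains k = true
      · -- k already seen: firsts unchanged, count at k bumped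
        have hkf : k ∈ pvFirsts PySem.Set.empty (E.map Prod.fst) := by
          rw [← pvInv_keys h]
          exact (PySem.Dict.contains_iff_mem_keys cnt k).1 hc
        have hkE : (List.map Prod.fst E).contains k = true := by
          exact List.elem_eq_true_of_mem (pvFirsts_mem _ _ hkf)
        rw [if_pos (by rw [hkE, Bool.or_true]), List.append_nil]
        rw [PySem.Dict.items_insert_of_contains cnt _ hc, h.2.1, List.map_map]
        apply List.map_congr_left
        intro k' hk'
        simp only [Function.comp]
        by_cases hkk : k' = k
        · subst hkk
          rw [pvCount_snoc]
          have hg := pvInv_getD h k hk'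
          simp [hg]
        · have hb : ((k', pvCount E k').1 == k) = false := by simp [hkk]
          simp only [hb, Bool.false_eq_true, if_false]
          rw [pvCount_snoc]
          simp [hkk]
      · -- fresh key: firsts gains k at the end, count 1
        have hcf : cnt.contains k = false := Bool.eq_false_iff.2 hc
        have hkf : k ∉ pvFirsts PySem.Set.empty (E.map Prod.fst) := by
          rw [← pvInv_keys h]
          intro hmem
          exact hc ((PySem.Dict.contains_iff_mem_keys cnt k).2 hmem)
        have hkE : (List.map Prod.fst E).contains k = false := by
          rw [Bool.eq_false_iff]
          intro hcc
          exact hkf (pvFirsts_complete _ _ (List.mem_of_elem_eq_true hcc) (by rfl))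
        rw [if_neg (by rw [hkE, Bool.or_false]; intro hh; exact nomatch hh)]
        rw [PySem.Dict.items_insert_of_not_contains cnt _ hcf, h.2.1, List.map_append]
        congr 1
        · apply List.map_congr_left
          intro k' hk'
          have hkk : k' ≠ k := fun hh => hkf (hh ▸ hk')
          rw [pvCount_snoc]
          simp [hkk]
        · have h0 : cnt.getD k 0 = 0 := PySem.Dict.getD_of_not_contains cnt 0 hcf
          have hc0 : E.countP (fun q => q.1 == k) = 0 := by
            rw [List.countP_eq_zero]
            intro q hq hbq
            have hqk : q.1 = k := by simpa using hbq
            have : k ∈ E.map Prod.fst := List.mem_map.2 ⟨q, hq, hqk⟩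
            have h2 : List.elem k (List.map Prod.fst E) = true := List.elem_eq_true_of_mem this
            have hkE2 : List.elem k (List.map Prod.fst E) = false := hkE
            rw [hkE2] at h2
            exact nomatch h2
          rw [List.map_cons, List.map_nil, pvCount_snoc]
          simp [h0, pvCount, hc0]
    · -- evidence relation
      intro k'
      rw [List.find?_append]
      by_cases hkk : k' = k
      · subst hkk
        by_cases hcond : ev.contains k = false ∧ e ≠ ""
        · rw [if_pos hcond, PySem.Dict.get?_insert, if_pos rfl]
          have hnone : ev.get? k = none := by
            rw [PySem.Dict.get?_eq_none_iff_contains]; exact hcond.1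
          have hfl : E.find? (fun q => q.1 == k && !(q.2 == "")) = none := by
            have hiv := h.2.2 k
            rw [hnone] at hiv
            cases hfe : E.find? (fun q => q.1 == k && !(q.2 == "")) with
            | none => rfl
            | some v => rw [hfe] at hiv; simp at hiv
          rw [hfl, Option.none_or]
          have hbe : (e == "") = false := by simp [hcond.2]
          simp [List.find?, hbe]
        · rw [if_neg hcond]
          rcases Decidable.not_and_iff_not_or_not.1 hcond with hc1 | hc2
          · -- ev already has evidence for k: find? E is some, the or keeps it
            have hcc : ev.contains k = true := by
              cases hcv : ev.contains k
              · exact absurd hcv hc1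
              · rfl
            have hsome : ev.get? k ≠ none := fun hn => by
              rw [PySem.Dict.get?_eq_none_iff_contains] at hn
              simp [hn] at hcc
            rcases Option.ne_none_iff_exists'.1 hsome with ⟨v, hv⟩
            have hiv := h.2.2 k
            rw [hv] at hiv
            cases hfe : E.find? (fun q => q.1 == k && !(q.2 == "")) with
            | none => rw [hfe] at hiv; simp at hiv
            | some q =>
              rw [hfe] at hiv
              rw [Option.some_or, hv, hiv]
          · -- empty excerpt: the appended event never matches the predicate
            have he : e = "" := by simpa using hc2
            subst he
            rw [h.2.2 k]
            cases hfe : E.find? (fun q => q.1 == k && !(q.2 == "")) with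
            | none => rw [Option.none_or]; simp [List.find?]
            | some q => rw [Option.some_or]
      · -- other keys unaffected
        have hb : (k == k') = false := by simp [Ne.symm hkk]
        have hsingle : List.find? (fun q => q.1 == k' && !(q.2 == "")) [(k, e)] = none := by
          simp [List.find?, hb]
        rw [hsingle, Option.or_none]
        by_cases hcond : ev.contains k = false ∧ e ≠ ""
        · rw [if_pos hcond, PySem.Dict.get?_insert, if_neg hkk]
          exact h.2.2 k'
        · rw [if_neg hcond]
          exact h.2.2 k'

theorem pvInv_pairs {cnt : PySem.Dict (String × String) Int} {ev : PySem.Dict (String × String) String}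
    {E : List ((String × String) × String)} (h : pvInv cnt ev E) (e : String)
    (cs : List (List String)) :
    pvInv (cs.foldl (fun st c => pvStepA st e c) (cnt, ev)).1
          (cs.foldl (fun st c => pvStepA st e c) (cnt, ev)).2
          (cs.foldl (fun E c => pvEvStep E e c) E) := by
  induction cs generalizing cnt ev E with
  | nil => exact h
  | cons c cs ih =>
    simp only [List.foldl_cons]
    have := pvInv_step h e c
    exact ih this

theorem pvInv_outer {cnt : PySem.Dict (String × String) Int} {ev : PySem.Dict (String × String) String}
    {E : List ((String × String) × String)} (h : pvInv cnt ev E)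
    (rows : List (Int × List String)) (sentences : List String) (mel : Int) :
    pvInv (rows.foldl (fun st p =>
            let qids := PySem.Set.ofList p.2
            if qids.length < 2 then st
            else
              let sent := if p.1 < (sentences.length : Int) then PySem.List.pyGetD sentences p.1 "" else ""
              let excerpt := PySem.Str.slice sent none (some mel)
              (PySem.List.combinations (PySem.List.sorted qids (fun x => x) false) 2).foldl
                (fun st c => pvStepA st excerpt c) st) (cnt, ev)).1
          (rows.foldl (fun st p =>
            let qids := PySem.Set.ofList p.2
            if qids.length < 2 then st
            else
              let sent := if p.1 < (sentences.length : Int) then PySem.List.pyGetD sentences p.1 "" else ""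
              let excerpt := PySem.Str.slice sent none (some mel)
              (PySem.List.combinations (PySem.List.sorted qids (fun x => x) false) 2).foldl
                (fun st c => pvStepA st excerpt c) st) (cnt, ev)).2
          (rows.foldl (fun E p =>
            let qids := PySem.Set.ofList p.2
            if qids.length < 2 then E
            else
              let excerpt := PySem.Str.slice
                (if p.1 < (sentences.length : Int) then PySem.List.pyGetD sentences p.1 "" else "")
                none (some mel)
              (PySem.List.combinations (PySem.List.sorted qids (fun x => x) false) 2).foldl
                (fun E c => pvEvStep E excerpt c) E) E) := by
  induction rows generalizing cnt ev E with
  | nil => exact h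
  | cons p rows ih =>
    simp only [List.foldl_cons]
    by_cases hq : (PySem.Set.ofList p.2).length < 2
    · simp only [if_pos hq]
      exact ih h
    · simp only [if_neg hq]
      have h2 := pvInv_pairs h
        (PySem.Str.slice (if p.1 < (sentences.length : Int) then PySem.List.pyGetD sentences p.1 "" else "") none (some mel))
        (PySem.List.combinations (PySem.List.sorted (PySem.Set.ofList p.2) (fun x => x) false) 2)
      exact ih h2

-- B's second pass, characterized: a scan with a seen-set emits, per first occurrence, pvEmit
theorem pvLoopB (events : List ((String × String) × String)) (mc : Int) :
    ∀ (rest : List ((String × String) × String)) (S : PySem.Set (String × String))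
      (acc : List (String × String × String × String × String)),
      (rest.foldl (pvStepB events mc) (S, acc)).2 =
        acc ++ (pvFirsts S (rest.map Prod.fst)).flatMap (pvEmit mc events) := by
  intro rest
  induction rest with
  | nil => intro S acc; simp [pvFirsts]
  | cons pe rest ih =>
    intro S acc
    simp only [List.foldl_cons, List.map_cons]
    by_cases hS : PySem.Set.contains S pe.1 = true
    · have hm : pe.1 ∈ S := List.mem_of_elem_eq_true hS
      have hstep : pvStepB events mc (S, acc) pe = (S, acc) := by
        simp [pvStepB, hm]
      rw [hstep, ih, pvFirsts, if_pos hS]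
    · have hfr : pvFirsts S (pe.1 :: rest.map Prod.fst) =
          pe.1 :: pvFirsts (PySem.Set.add S pe.1) (rest.map Prod.fst) := by
        rw [pvFirsts, if_neg hS]
      rw [hfr, List.flatMap_cons]
      have hstep : pvStepB events mc (S, acc) pe =
          (PySem.Set.add S pe.1, acc ++ pvEmit mc events pe.1) := by
        simp only [pvStepB]
        rw [if_neg hS]
        by_cases hmc : mc ≤ ((events.countP (fun q => q.1 == pe.1) : Int))
        · rw [if_pos hmc]
          simp [pvEmit, pvCount, pvEvid, hmc]
        · rw [if_neg hmc]
          simp [pvEmit, pvCount, hmc]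
      rw [hstep, ih, List.append_assoc]

-- A's final pass, characterized: under the invariant it also produces the flatMap of pvEmit
theorem pvFinal {cnt : PySem.Dict (String × String) Int} {ev : PySem.Dict (String × String) String}
    {E : List ((String × String) × String)} (h : pvInv cnt ev E) (mc : Int) :
    cnt.items.foldl
      (fun edges kc =>
        if kc.2 < mc then edges
        else edges ++ [(kc.1.1, "CO_MENTIONED", kc.1.2, "co_mentions=" ++ PySem.Int.toStr kc.2, ev.getD kc.1 "")]) [] =
    (pvFirsts PySem.Set.empty (E.map Prod.fst)).flatMap (pvEmit mc E) := by
  rw [h.2.1, List.foldl_map]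
  have hcong := PySem.List.foldl_congr_mem (pvFirsts PySem.Set.empty (E.map Prod.fst))
    (fun edges k => (fun edges kc =>
        if kc.2 < mc then edges
        else edges ++ [(kc.1.1, "CO_MENTIONED", kc.1.2, "co_mentions=" ++ PySem.Int.toStr kc.2, ev.getD kc.1 "")]) edges ((fun k => (k, pvCount E k)) k))
    (fun edges k => edges ++ pvEmit mc E k) []
    (by
      intro acc k _
      simp only []
      have hev : ev.getD k "" = pvEvid E k := by
        rw [PySem.Dict.getD_eq_get?_getD, h.2.2 k]
        rfl
      by_cases hlt : pvCount E k < mc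
      · rw [if_pos hlt]
        simp [pvEmit, not_le.2 hlt]
      · rw [if_neg hlt, hev]
        simp [pvEmit, not_lt.1 hlt])
  rw [hcong, PySem.List.foldl_append_eq_flatMap, List.nil_append]

-- ===== VERDICT (by name: the statement is the Claim_ definition above) =====
theorem build_comention_edges_spec : Claim_equal_build_comention_edges := by
  intro sentence_qids sentences min_co_mentions max_evidence_len _
  unfold Spec_build_comention_edges build_comention_edges build_comention_edges_alt
  have h0 : pvInv PySem.Dict.empty PySem.Dict.empty [] := by
    refine ⟨by simp [PySem.Dict.keys, PySem.Dict.empty], rfl, ?_⟩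
    intro k
    rw [PySem.Dict.get?_empty]
    rfl
  have hinv := pvInv_outer h0 (PySem.List.enumerate sentence_qids 0) sentences max_evidence_len
  have hA := pvFinal hinv min_co_mentions
  exact hA.trans (((pvLoopB _ min_co_mentions _ PySem.Set.empty []).trans (List.nil_append _)).symm)
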